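-- pv_equiv track=rewrite | github.com/benquick123/code-profiling | code/batch-2/vse-naloge-brez-testov/DN12-Z-060.py | hamiltonova
-- ===== SOURCE A (Python) =====
-- def mozna_pot(pot, zemljevid):
--     if len(zemljevid[pot[0]]) != 1: #ne začne se z končno povezavo
--         return False
--     if len(zemljevid[pot[-1]]) != 1: #ne konča se z končno povezavo
--         return False
--     # vmes ni končnih povezav
--     vmesna_pot = pot[1:-1] # gledamo samo vmesno pot...
--     for item in range(0, len(vmesna_pot)):
--         if len(zemljevid[vmesna_pot[item]]) == 1: #vmes imamo končno točko
--             return False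
--     # nobeno krožišče se ne ponovi - odstrani zaporedne podvojene
--     for item in range(1, len(pot)):
--         if(pot[item] == pot[item-1]):
--             return False
--     # krožišča so na poti dejansko povezana
--     for item in range(1, len(pot)):
--         if pot[item] not in zemljevid[pot[item-1]]:
--             return False
--     return True
--
-- def hamiltonova(pot, zemljevid):
--     #duplicate dict dict2 = dict(dict1)
--     moj_zemljevid = dict(zemljevid)
--     if not mozna_pot(pot, zemljevid):
--         return False
--     for item in range(0, len(pot)):
--         if not pot[item] in moj_zemljevid: #smo že šli čez krožišče - ponavljanje, pazimo zaradi delete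
--             return False
--         else:
--             del moj_zemljevid[pot[item]]
--     for seznam in moj_zemljevid:
--         if len(moj_zemljevid[seznam]) != 1:
--             return False
--     return True
-- ===== SOURCE B (Python) =====
-- def hamiltonova(pot, zemljevid):
--     # endpoints must be dead ends (degree exactly 1)
--     if len(zemljevid[pot[0]]) != 1 or len(zemljevid[pot[-1]]) != 1:
--         return False
--     # one walk along pot: no repeats (visited set), adjacency to the
--     # predecessor, interior vertices must not be dead ends
--     visited = {pot[0]}
--     for i in range(1, len(pot)):
--         cur = pot[i]
--         if cur in visited or cur not in zemljevid[pot[i - 1]]: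
--             return False
--         if i < len(pot) - 1 and len(zemljevid[cur]) == 1:
--             return False
--         visited.add(cur)
--     # every vertex not on the path must be a dead end
--     return all(len(ns) == 1 for v, ns in zemljevid.items() if v not in visited)
-- ===== Notes on version B (the rewrite author's own statement) =====
-- stated objective: simpler
-- what changed: A's helper plus six separate scans (two endpoint checks, an interior-degree scan, a consecutive-duplicate scan, an adjacency scan, and a repeat check that deletes entries from a copied dict, then a scan of the leftover dict) are merged into one walk over pot with a visited set checking repeats, adjacency and interior degree together, followed by a single pass over the map requiring degree 1 for unvisited vertices.
import Mathlib
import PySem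

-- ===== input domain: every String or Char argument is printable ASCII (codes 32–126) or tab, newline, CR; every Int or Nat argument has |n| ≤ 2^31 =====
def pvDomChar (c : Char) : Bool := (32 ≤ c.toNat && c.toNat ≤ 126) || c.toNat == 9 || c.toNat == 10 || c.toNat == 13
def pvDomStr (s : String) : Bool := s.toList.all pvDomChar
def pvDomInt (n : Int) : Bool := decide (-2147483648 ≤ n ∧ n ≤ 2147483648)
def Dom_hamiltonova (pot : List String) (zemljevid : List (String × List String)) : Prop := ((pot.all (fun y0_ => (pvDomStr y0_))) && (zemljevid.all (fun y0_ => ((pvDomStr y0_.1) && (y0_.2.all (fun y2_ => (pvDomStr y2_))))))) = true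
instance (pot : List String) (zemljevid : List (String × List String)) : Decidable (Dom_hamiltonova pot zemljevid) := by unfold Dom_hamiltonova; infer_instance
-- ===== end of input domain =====

-- B replaces A's six separate scans and mutated dict copy by one walk over `pot`
-- with a visited set plus one final pass over the map (objective: simpler; return value only).

-- ===== PORT A =====
-- zemljevid is a Python dict; its assoc-list lookup (first match) is the dict lookup
def pvLook (z : List (String × List String)) (k : String) : Option (List String) :=
  (z.find? (fun p => p.1 == k)).map Prod.snd

-- 'for item in range(0, len(vmesna_pot)): if len(zemljevid[vmesna_pot[item]]) == 1: return False'
-- (none = KeyError, excluded by Pre_; the port returns false there)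
def chkVmes (z : List (String × List String)) : List String → Bool
  | [] => true
  | v :: rest =>
    match pvLook z v with
    | none => false
    | some ns => if ns.length == 1 then false else chkVmes z rest

-- 'for item in range(1, len(pot)): if pot[item] == pot[item-1]: return False'
def chkDup : List String → Bool
  | a :: b :: rest => if b == a then false else chkDup (b :: rest)
  | _ => true

-- 'for item in range(1, len(pot)): if pot[item] not in zemljevid[pot[item-1]]: return False'
def chkAdj (z : List (String × List String)) : List String → Bool
  | a :: b :: rest =>
    match pvLook z a with
    | none => false
    | some ns => if !(ns.contains b) then false else chkAdj z (b :: rest)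
  | _ => true

def mozna_pot (pot : List String) (z : List (String × List String)) : Bool :=
  match PySem.List.pyGet? pot 0 with
  | none => false                    -- IndexError (empty pot), excluded by Pre_
  | some p0 =>
    match pvLook z p0 with
    | none => false                  -- KeyError, excluded by Pre_
    | some ns0 =>
      if ns0.length != 1 then false
      else
        match PySem.List.pyGet? pot (-1) with
        | none => false
        | some pl =>
          match pvLook z pl with
          | none => false            -- KeyError, excluded by Pre_
          | some nsl =>
            if nsl.length != 1 then false
            else chkVmes z (PySem.List.slice pot (some 1) (some (-1))) &&
                 chkDup pot && chkAdj z pot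

-- 'for item in range(0, len(pot)): if not pot[item] in moj_zemljevid: return False
--  else: del moj_zemljevid[pot[item]]'  (the dict copy is the assoc list; del = remove the entry)
def delLoop (moj : List (String × List String)) : List String → Option (List (String × List String))
  | [] => some moj
  | v :: rest =>
    if moj.any (fun p => p.1 == v) then delLoop (moj.eraseP (fun p => p.1 == v)) rest
    else none

def hamiltonova (pot : List String) (zemljevid : List (String × List String)) : Bool :=
  if !(mozna_pot pot zemljevid) then false
  else
    match delLoop zemljevid pot with
    | none => false
    | some rem =>
      -- 'for seznam in moj_zemljevid: if len(moj_zemljevid[seznam]) != 1: return False'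
      rem.all (fun p => p.2.length == 1)

-- ===== PORT B =====
-- single walk over the rest of pot: visited set, adjacency to predecessor, interior degree
def bWalk (z : List (String × List String)) (visited : PySem.Set String) (prev : String) :
    List String → Bool
  | [] => z.all (fun p => PySem.Set.contains visited p.1 || p.2.length == 1)
  | cur :: rest =>
    if PySem.Set.contains visited cur then false
    else
      match pvLook z prev with
      | none => false
      | some ns =>
        if !(ns.contains cur) then false
        else
          if rest.isEmpty then bWalk z (PySem.Set.add visited cur) cur rest
          else
            match pvLook z cur with
            | none => false          -- KeyError, excluded by Pre_
            | some nsc =>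
              if nsc.length == 1 then false
              else bWalk z (PySem.Set.add visited cur) cur rest

def hamiltonova_alt (pot : List String) (zemljevid : List (String × List String)) : Bool :=
  match PySem.List.pyGet? pot 0, PySem.List.pyGet? pot (-1) with
  | some p0, some pl =>
    match pvLook zemljevid p0 with
    | none => false
    | some ns0 =>
      if ns0.length != 1 then false
      else
        match pvLook zemljevid pl with
        | none => false
        | some nsl =>
          if nsl.length != 1 then false
          else bWalk zemljevid (PySem.Set.add PySem.Set.empty p0) p0 pot.tail
  | _, _ => false

-- ===== PRECONDITION & SPEC =====
def pvPresent (z : List (String × List String)) (v : String) : Bool := (pvLook z v).isSome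
def pvDeg1 (z : List (String × List String)) (v : String) : Bool :=
  match pvLook z v with
  | some ns => ns.length == 1
  | none => false

-- Pre_ excludes (a) assoc lists with duplicate keys, which do not represent a Python dict
-- (the argument is a dict), and (b) exactly the inputs on which A raises: empty pot
-- (IndexError), pot[0] missing (KeyError), pot[-1] missing while deg(pot[0]) = 1, and a
-- missing interior vertex reached before any degree-1 interior vertex (KeyError).
def Pre_hamiltonova (pot : List String) (zemljevid : List (String × List String)) : Prop :=
  (zemljevid.map Prod.fst).Nodup ∧
  pot ≠ [] ∧
  pvPresent zemljevid (pot.headI) = true ∧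
  (pvDeg1 zemljevid (pot.headI) = true → pvPresent zemljevid (pot.getLastD "") = true) ∧
  (pvDeg1 zemljevid (pot.headI) = true → pvDeg1 zemljevid (pot.getLastD "") = true →
    ∀ j < (pot.tail.dropLast).length,
      pvPresent zemljevid ((pot.tail.dropLast).getD j "") = false →
        ∃ k < j, pvDeg1 zemljevid ((pot.tail.dropLast).getD k "") = true)

instance (pot : List String) (zemljevid : List (String × List String)) :
    Decidable (Pre_hamiltonova pot zemljevid) := by unfold Pre_hamiltonova; infer_instance

def pvWitness_hamiltonova : List String × (List (String × List String)) :=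
  (["a", "b"], [("a", ["b"]), ("b", ["a"])])

def Spec_hamiltonova (pot : List String) (zemljevid : List (String × List String)) (out : Bool) : Prop := out = hamiltonova_alt pot zemljevid
instance (pot : List String) (zemljevid : List (String × List String)) (out : Bool) : Decidable (Spec_hamiltonova pot zemljevid out) := by unfold Spec_hamiltonova; infer_instance

-- ===== CLAIM (what is proved, stated in full; the proofs are below) =====
def Claim_equal_hamiltonova : Prop := ∀ (pot : List String) (zemljevid : List (String × List String)), Dom_hamiltonova pot zemljevid → Pre_hamiltonova pot zemljevid → Spec_hamiltonova pot zemljevid (hamiltonova pot zemljevid)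

-- ===== LEMMAS AND PROOFS =====

def pvInt (z : List (String × List String)) (v : String) : Bool :=
  match pvLook z v with
  | some ns => !(ns.length == 1)
  | none => false

def pvAdj (z : List (String × List String)) (a b : String) : Bool :=
  match pvLook z a with
  | some ns => ns.contains b
  | none => false

-- the common characterisation both programs compute (pot = h :: t)
def PvPhi (z : List (String × List String)) (h : String) (t : List String) : Prop :=
  pvDeg1 z h = true ∧ pvDeg1 z (t.getLastD h) = true ∧
  (∀ v ∈ t.dropLast, pvInt z v = true) ∧
  (h :: t).Nodup ∧
  List.IsChain (fun a b => pvAdj z a b = true) (h :: t) ∧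
  (∀ p ∈ z, p.1 ∈ (h :: t) ∨ p.2.length = 1)

theorem chkVmes_eq (z : List (String × List String)) (l : List String) :
    chkVmes z l = l.all (pvInt z) := by
  induction l with
  | nil => rfl
  | cons v rest ih =>
    simp only [chkVmes, List.all_cons, pvInt]
    cases pvLook z v with
    | none => simp
    | some ns => by_cases h : ns.length = 1 <;> simp [h, ih]

theorem chkDup_of_nodup (l : List String) (h : l.Nodup) : chkDup l = true := by
  match l with
  | [] => rfl
  | [a] => rfl
  | a :: b :: rest =>
    rw [List.nodup_cons] at h
    have hba : b ≠ a := fun e => h.1 (e ▸ List.mem_cons_self)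
    rw [chkDup, if_neg (by simp [hba])]
    exact chkDup_of_nodup (b :: rest) h.2

theorem chkAdj_iff (z : List (String × List String)) (l : List String) :
    chkAdj z l = true ↔ List.IsChain (fun a b => pvAdj z a b = true) l := by
  match l with
  | [] => simp [chkAdj]
  | [a] => simp [chkAdj]
  | a :: b :: rest =>
    rw [List.isChain_cons_cons, ← chkAdj_iff z (b :: rest)]
    simp only [chkAdj, pvAdj]
    cases pvLook z a with
    | none => simp
    | some ns =>
      cases ns.contains b <;> simp

theorem eraseP_eq_filter_keys (z : List (String × List String)) (v : String)
    (hk : (z.map Prod.fst).Nodup) :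
    z.eraseP (fun p => p.1 == v) = z.filter (fun p => !(p.1 == v)) := by
  induction z with
  | nil => rfl
  | cons p ps ih =>
    simp only [List.map_cons, List.nodup_cons] at hk
    by_cases h : p.1 = v
    · rw [List.eraseP_cons_of_pos (by simp [h]), List.filter_cons_of_neg (by simp [h])]
      rw [List.filter_eq_self.2]
      intro q hq
      simp only [Bool.not_eq_eq_eq_not, Bool.not_true, beq_eq_false_iff_ne]
      intro e; exact hk.1 (h ▸ e ▸ List.mem_map_of_mem hq)
    · rw [List.eraseP_cons_of_neg (by simp [h]), List.filter_cons_of_pos (by simp [h]), ih hk.2]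

theorem pvLook_isSome_iff (z : List (String × List String)) (v : String) :
    (pvLook z v).isSome = true ↔ z.any (fun p => p.1 == v) = true := by
  simp [pvLook, List.find?_isSome, List.any_eq_true]

theorem delLoop_eq (pot : List String) :
    ∀ (moj : List (String × List String)), (moj.map Prod.fst).Nodup →
    delLoop moj pot =
      if pot.Nodup ∧ ∀ v ∈ pot, (pvLook moj v).isSome = true then
        some (moj.filter (fun p => !(pot.contains p.1)))
      else none := by
  induction pot with
  | nil =>
    intro moj _
    simp [delLoop, List.filter_eq_self.2]
  | cons v rest ih =>
    intro moj hk
    simp only [delLoop]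
    by_cases hv : moj.any (fun p => p.1 == v) = true
    · rw [if_pos hv]
      have hk' : ((moj.eraseP (fun p => p.1 == v)).map Prod.fst).Nodup := by
        exact (hk.sublist ((List.eraseP_sublist).map Prod.fst))
      rw [ih _ hk', eraseP_eq_filter_keys _ _ hk]
      have hmem : ∀ w, ((pvLook (moj.filter (fun p => !(p.1 == v))) w).isSome = true) ↔
          (w ≠ v ∧ (pvLook moj w).isSome = true) := by
        intro w
        simp only [pvLook_isSome_iff, List.any_eq_true, List.mem_filter]
        constructor
        · rintro ⟨p, ⟨hp, hnv⟩, he⟩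
          refine ⟨?_, ⟨p, hp, he⟩⟩
          intro e; subst e; simp at he hnv; exact hnv he
        · rintro ⟨hwv, p, hp, he⟩
          exact ⟨p, ⟨hp, by simp at he ⊢; rw [he]; exact hwv⟩, he⟩
      by_cases hcond : rest.Nodup ∧ ∀ w ∈ rest, (pvLook moj w).isSome = true
      · by_cases hvr : v ∈ rest
        · -- LHS condition fails (v removed), RHS condition fails (not nodup)
          rw [if_neg, if_neg]
          · rintro ⟨hnd, -⟩; exact (List.nodup_cons.1 hnd).1 hvr
          · rintro ⟨-, hall⟩
            have := (hmem v).1 (hall v hvr)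
            exact this.1 rfl
        · rw [if_pos, if_pos]
          · congr 1
            rw [List.filter_filter]
            apply List.filter_congr
            intro p _
            simp only [List.contains_cons, Bool.not_or, Bool.and_comm, beq_eq_decide, eq_comm]
          · exact ⟨List.nodup_cons.2 ⟨hvr, hcond.1⟩, by
              intro w hw
              rcases List.mem_cons.1 hw with e | hwr
              · subst e; rwa [pvLook_isSome_iff]
              · exact hcond.2 w hwr⟩
          · exact ⟨hcond.1, fun w hw => (hmem w).2 ⟨fun e => hvr (e ▸ hw), hcond.2 w hw⟩⟩
      · rw [if_neg, if_neg]
        · rintro ⟨hnd, hall⟩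
          exact hcond ⟨(List.nodup_cons.1 hnd).2, fun w hw => hall w (List.mem_cons_of_mem _ hw)⟩
        · rintro ⟨hnd, hall⟩
          exact hcond ⟨hnd, fun w hw => ((hmem w).1 (hall w hw)).2⟩
    · rw [if_neg hv, if_neg]
      rintro ⟨-, hall⟩
      exact hv ((pvLook_isSome_iff moj v).1 (hall v List.mem_cons_self))

theorem slice_one_neg_one (l : List String) :
    PySem.List.slice l (some 1) (some (-1)) = l.tail.dropLast := by
  simp only [PySem.List.slice, PySem.List.clampIdx]
  cases l with
  | nil => simp
  | cons a t =>
    have hlen : ((a :: t).length : Int) = (t.length : Int) + 1 := by simp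
    rw [if_pos (by norm_num : (-1 : Int) < 0),
        if_neg (by rw [hlen]; omega : ¬ ((a :: t).length : Int) + -1 < 0),
        if_neg (by norm_num : ¬ (1 : Int) < 0)]
    have h1 : min (Int.toNat 1) (a :: t).length = 1 := by simp
    have h2 : (((a :: t).length : Int) + -1).toNat = t.length := by
      rw [hlen]; omega
    rw [h1, h2]
    simp only [List.drop_one, List.tail_cons]
    rw [List.dropLast_eq_take]

theorem getLastD_eq_getLast (t : List String) (h : String) (hne : t ≠ []) :
    t.getLastD h = t.getLast hne := by
  rw [List.getLastD_eq_getLast?, List.getLast?_eq_some_getLast hne]; rfl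

theorem getLast?_cons_eq (h : String) (t : List String) :
    (h :: t).getLast? = some (t.getLastD h) := by
  cases t with
  | nil => rfl
  | cons b u =>
    rw [List.getLast?_eq_some_getLast (l := h :: b :: u) (by simp), List.getLast_cons (by simp),
      getLastD_eq_getLast (b :: u) h (by simp)]

theorem bWalk_iff (z : List (String × List String)) (rest : List String) :
    ∀ (vis : PySem.Set String) (prev : String),
    bWalk z vis prev rest = true ↔
      (List.IsChain (fun a b => pvAdj z a b = true) (prev :: rest) ∧
       rest.Nodup ∧ (∀ v ∈ rest, v ∉ vis) ∧
       (∀ v ∈ rest.dropLast, pvInt z v = true) ∧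
       (∀ p ∈ z, p.1 ∈ vis ∨ p.1 ∈ rest ∨ p.2.length = 1)) := by
  induction rest with
  | nil =>
    intro vis prev
    simp [bWalk, List.all_eq_true]
  | cons cur rest' ih =>
    intro vis prev
    simp only [bWalk]
    by_cases hc : PySem.Set.contains vis cur = true
    · simp only [if_pos hc, Bool.false_eq_true, false_iff]
      rintro ⟨-, -, hnv, -⟩
      exact hnv cur List.mem_cons_self ((PySem.Set.contains_iff _ _).1 hc)
    · rw [if_neg hc]
      have hcv : cur ∉ vis := fun m => hc ((PySem.Set.contains_iff _ _).2 m)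
      cases hl : pvLook z prev with
      | none =>
        simp only [Bool.false_eq_true, false_iff]
        rintro ⟨hch, -⟩
        have := (List.isChain_cons_cons.1 hch).1
        simp [pvAdj, hl] at this
      | some ns =>
        have hadj : pvAdj z prev cur = (ns.contains cur) := by simp [pvAdj, hl]
        by_cases hin : ns.contains cur = true
        · simp only [hin, Bool.not_true, Bool.false_eq_true, if_false]
          cases rest' with
          | nil =>
            simp only [List.isEmpty_nil, if_true, ih]
            have hadjt : pvAdj z prev cur = true := by rw [hadj]; exact hin
            simp [List.isChain_cons_cons, hadjt, hcv]
            constructor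
            · intro hfin a b hab; specialize hfin a b hab; tauto
            · intro hfin a b hab; specialize hfin a b hab; tauto
          | cons d ds =>
            rw [show (d :: ds).isEmpty = false from rfl, if_neg (c := (false = true)) (by simp)]
            cases hlc : pvLook z cur with
            | none =>
              simp only [Bool.false_eq_true, false_iff]
              rintro ⟨-, -, -, hint, -⟩
              have := hint cur (by simp)
              simp [pvInt, hlc] at this
            | some nsc =>
              by_cases h1 : nsc.length == 1
              · simp only [h1, reduceIte, Bool.false_eq_true, false_iff]
                rintro ⟨-, -, -, hint, -⟩
                have := hint cur (by simp)
                simp [pvInt, hlc] at this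
                exact this (by simpa using h1)
              · simp only []
                rw [if_neg h1, ih]
                have hadjt : pvAdj z prev cur = true := by rw [hadj]; exact hin
                have hint : pvInt z cur = true := by
                  simp [pvInt, hlc]; simpa using h1
                have hdl : (cur :: d :: ds).dropLast = cur :: (d :: ds).dropLast := by
                  simp
                constructor
                · rintro ⟨hch, hnd, hnv, hintl, hfin⟩
                  have hcm : cur ∉ (d :: ds) := fun m =>
                    (hnv cur m) ((PySem.Set.mem_add _ _ _).2 (Or.inr rfl))
                  refine ⟨List.isChain_cons_cons.2 ⟨hadjt, hch⟩, List.nodup_cons.2 ⟨hcm, hnd⟩,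
                    ?_, ?_, ?_⟩
                  · intro v hv
                    rcases List.mem_cons.1 hv with e | hv'
                    · exact e ▸ hcv
                    · exact fun hvv => (hnv v hv') ((PySem.Set.mem_add _ _ _).2 (Or.inl hvv))
                  · rw [hdl]
                    intro v hv
                    rcases List.mem_cons.1 hv with e | hv'
                    · exact e ▸ hint
                    · exact hintl v hv'
                  · intro p hp
                    rcases hfin p hp with hv | h
                    · rcases (PySem.Set.mem_add _ _ _).1 hv with hv' | e
                      · exact Or.inl hv'
                      · exact Or.inr (Or.inl (by simp [e]))
                    · rcases h with h | h
                      · exact Or.inr (Or.inl (List.mem_cons_of_mem _ h))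
                      · exact Or.inr (Or.inr h)
                · rintro ⟨hch, hnd, hnv, hintl, hfin⟩
                  obtain ⟨hcm, hnd'⟩ := List.nodup_cons.1 hnd
                  refine ⟨(List.isChain_cons_cons.1 hch).2, hnd', ?_, ?_, ?_⟩
                  · intro v hv hvv
                    rcases (PySem.Set.mem_add _ _ _).1 hvv with hv' | e
                    · exact (hnv v (List.mem_cons_of_mem _ hv)) hv'
                    · exact hcm (e ▸ hv)
                  · intro v hv
                    exact hintl v (by rw [hdl]; exact List.mem_cons_of_mem _ hv)
                  · intro p hp
                    rcases hfin p hp with hv | h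
                    · exact Or.inl ((PySem.Set.mem_add _ _ _).2 (Or.inl hv))
                    · rcases h with h | h
                      · rcases List.mem_cons.1 h with e | h'
                        · exact Or.inl ((PySem.Set.mem_add _ _ _).2 (Or.inr e))
                        · exact Or.inr (Or.inl h')
                      · exact Or.inr (Or.inr h)
        · rw [Bool.not_eq_true] at hin
          simp only [hin, Bool.not_false, if_true, Bool.false_eq_true, false_iff]
          rintro ⟨hch, -⟩
          have := (List.isChain_cons_cons.1 hch).1
          rw [hadj, hin] at this
          exact Bool.false_ne_true this

theorem isSome_of_deg1 {z : List (String × List String)} {v : String}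
    (h : pvDeg1 z v = true) : (pvLook z v).isSome = true := by
  unfold pvDeg1 at h; cases e : pvLook z v <;> rw [e] at h <;> simp_all

theorem isSome_of_int {z : List (String × List String)} {v : String}
    (h : pvInt z v = true) : (pvLook z v).isSome = true := by
  unfold pvInt at h; cases e : pvLook z v <;> rw [e] at h <;> simp_all

-- every member of pot is present, given Phi's degree facts

-- every member of pot is present, given Phi's degree facts
theorem phi_present (z : List (String × List String)) (h : String) (t : List String)
    (hd : pvDeg1 z h = true) (hw : pvDeg1 z (t.getLastD h) = true)
    (hint : ∀ v ∈ t.dropLast, pvInt z v = true) :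
    ∀ v ∈ (h :: t), (pvLook z v).isSome = true := by
  intro v hv
  rcases List.mem_cons.1 hv with e | hvt
  · exact e ▸ isSome_of_deg1 hd
  · have hne : t ≠ [] := fun e' => by simp [e'] at hvt
    have : v ∈ t.dropLast ++ [t.getLast hne] := by
      rw [List.dropLast_concat_getLast hne]; exact hvt
    rcases List.mem_append.1 this with hvd | hvl
    · exact isSome_of_int (hint v hvd)
    · have : v = t.getLastD h := by
        rw [getLastD_eq_getLast t h hne]; simpa using hvl
      exact this ▸ isSome_of_deg1 hw

theorem match_deg (z : List (String × List String)) (v : String) (X : Bool) :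
    (match pvLook z v with
     | none => false
     | some ns => if ns.length != 1 then false else X) = (pvDeg1 z v && X) := by
  unfold pvDeg1
  cases pvLook z v with
  | none => rfl
  | some ns => by_cases e : ns.length = 1 <;> simp [e]

theorem if_not_then_false (m X : Bool) : (if !m then false else X) = (m && X) := by
  cases m <;> simp

theorem A_iff (z : List (String × List String)) (h : String) (t : List String)
    (hk : (z.map Prod.fst).Nodup) :
    hamiltonova (h :: t) z = true ↔ PvPhi z h t := by
  have hA : hamiltonova (h :: t) z
      = (pvDeg1 z h && (pvDeg1 z (t.getLastD h) &&
          (chkVmes z t.dropLast && chkDup (h :: t) && chkAdj z (h :: t))) &&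
         (match delLoop z (h :: t) with
          | none => false
          | some rem => rem.all (fun p => p.2.length == 1))) := by
    unfold hamiltonova mozna_pot
    rw [PySem.List.pyGet?_zero_cons, PySem.List.pyGet?_neg_one, getLast?_cons_eq,
      slice_one_neg_one, List.tail_cons]
    simp only [match_deg, if_not_then_false]
  rw [hA, delLoop_eq _ _ hk]
  simp only [Bool.and_eq_true, chkVmes_eq, List.all_eq_true, chkAdj_iff]
  unfold PvPhi
  constructor
  · rintro ⟨⟨hd, hw, ⟨hvm, hdup⟩, hadj⟩, hyp⟩
    by_cases hcond : (h :: t).Nodup ∧ ∀ v ∈ (h :: t), (pvLook z v).isSome = true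
    · rw [if_pos hcond] at hyp
      refine ⟨hd, hw, hvm, hcond.1, hadj, ?_⟩
      intro p hp
      by_cases hmem : p.1 ∈ (h :: t)
      · exact Or.inl hmem
      · right
        simp only [List.all_eq_true] at hyp
        have := hyp p (List.mem_filter.2 ⟨hp, by simp [hmem]⟩)
        simpa using this
    · rw [if_neg hcond] at hyp; exact absurd hyp (by simp)
  · rintro ⟨hd, hw, hvm, hnd, hch, hfin⟩
    have hpres := phi_present z h t hd hw hvm
    refine ⟨⟨hd, hw, ⟨hvm, chkDup_of_nodup _ hnd⟩, hch⟩, ?_⟩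
    rw [if_pos ⟨hnd, hpres⟩]
    simp only [List.all_eq_true]
    intro p hp
    obtain ⟨hpz, hpc⟩ := List.mem_filter.1 hp
    rcases hfin p hpz with hmem | hlen
    · simp [hmem] at hpc
    · simpa using hlen

theorem B_iff (z : List (String × List String)) (h : String) (t : List String) :
    hamiltonova_alt (h :: t) z = true ↔ PvPhi z h t := by
  have hB : hamiltonova_alt (h :: t) z
      = (pvDeg1 z h && (pvDeg1 z (t.getLastD h) &&
          bWalk z (PySem.Set.add PySem.Set.empty h) h t)) := by
    unfold hamiltonova_alt
    rw [PySem.List.pyGet?_zero_cons, PySem.List.pyGet?_neg_one, getLast?_cons_eq,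
      List.tail_cons]
    simp only [match_deg]
  have hvis : PySem.Set.add PySem.Set.empty h = [h] := rfl
  rw [hB, hvis, Bool.and_eq_true, Bool.and_eq_true, bWalk_iff]
  unfold PvPhi
  constructor
  · rintro ⟨hd, hw, hch, hnd, hnv, hintl, hfin⟩
    refine ⟨hd, hw, hintl, List.nodup_cons.2 ⟨fun hm => (hnv h hm) (by simp), hnd⟩, hch, ?_⟩
    intro p hp
    rcases hfin p hp with hv | (hm | hl)
    · exact Or.inl (by simp at hv; simp [hv])
    · exact Or.inl (List.mem_cons_of_mem _ hm)
    · exact Or.inr hl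
  · rintro ⟨hd, hw, hintl, hnd0, hch, hfin⟩
    obtain ⟨hhm, hnd⟩ := List.nodup_cons.1 hnd0
    refine ⟨hd, hw, hch, hnd, ?_, hintl, ?_⟩
    · intro v hv hvm
      simp at hvm; exact hhm (hvm ▸ hv)
    · intro p hp
      rcases hfin p hp with hm | hl
      · rcases List.mem_cons.1 hm with e | hm'
        · exact Or.inl (by simp [e])
        · exact Or.inr (Or.inl hm')
      · exact Or.inr (Or.inr hl)

-- ===== VERDICT (by name: the statement is the Claim_ definition above) =====
theorem hamiltonova_spec : Claim_equal_hamiltonova := by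
  intro pot z _ hpre
  obtain ⟨hk, hne, -⟩ := hpre
  obtain ⟨h, t, rfl⟩ := List.exists_cons_of_ne_nil hne
  show hamiltonova (h :: t) z = hamiltonova_alt (h :: t) z
  rw [Bool.eq_iff_iff, A_iff z h t hk, B_iff z h t]
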